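-- pv_equiv track=rewrite | github.com/CTStudyGroup/BOJ | _youn/boj_17503.py | solve
-- ===== SOURCE A (Python) =====
-- import heapq
--
-- def solve(Beers, N, M, K):
--     Jeon = []
--     curr_M = 0
--     for _ in range(K):
--         c, m = heapq.heappop(Beers)
--         curr_M += m
--         heapq.heappush(Jeon, m)
--
--         if len(Jeon) == N:
--             if curr_M >= M: return c
--             else:
--                 curr_M -= heapq.heappop(Jeon)
--     return -1
-- ===== SOURCE B (Python) =====
-- import heapq
--
-- def solve(Beers, N, M, K):
--     # Window of the best values kept as an ASCENDING list: each new m is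
--     # inserted at its position by a scan, so the weakest is always window[0].
--     # Beers is drained with heapq.heappop exactly as in the original.
--     window = []
--     total = 0
--     for _ in range(K):
--         c, m = heapq.heappop(Beers)
--         total += m
--         i = 0
--         while i < len(window) and window[i] <= m:
--             i += 1
--         window.insert(i, m)
--         if len(window) == N:
--             if total >= M:
--                 return c
--             total -= window[0]
--             window = window[1:]
--     return -1
-- ===== Notes on version B (the rewrite author's own statement) =====
-- stated objective: alternative
-- what changed: B keeps the heappop draining of Beers (same mutation) but replaces A's internal min-heap Jeon by an ascending sorted list: each m is inserted at its position by a linear scan and the weakest beer is evicted from the head, instead of heappush/heappop on a binary heap.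
-- outside the precondition, e.g. on solve([[1, 5]], 1, 0, 2): A returns 1, B returns 1; on solve([[1, 5], [2, 3, 4]], 1, 0, 2): A returns 1, B returns 1; on solve([[1, 5]], 2, 0, 2): A raises IndexError, B raises IndexError
import Mathlib
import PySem

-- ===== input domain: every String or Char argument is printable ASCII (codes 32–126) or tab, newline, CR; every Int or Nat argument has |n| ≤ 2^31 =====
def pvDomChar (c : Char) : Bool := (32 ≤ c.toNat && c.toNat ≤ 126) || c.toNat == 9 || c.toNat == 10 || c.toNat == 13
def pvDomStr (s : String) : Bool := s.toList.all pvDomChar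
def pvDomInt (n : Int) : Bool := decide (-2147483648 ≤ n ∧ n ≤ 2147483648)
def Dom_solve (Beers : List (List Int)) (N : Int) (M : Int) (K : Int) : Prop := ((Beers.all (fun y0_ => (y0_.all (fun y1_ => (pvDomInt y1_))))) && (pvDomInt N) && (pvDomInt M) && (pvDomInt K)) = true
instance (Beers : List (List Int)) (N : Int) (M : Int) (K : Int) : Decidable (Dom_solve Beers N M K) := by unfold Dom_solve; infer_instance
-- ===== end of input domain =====

-- B replaces A's internal min-heap Jeon by an ASCENDING SORTED LIST: each value is
-- inserted at its position by a linear scan and the weakest is evicted from the head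
-- (objective: alternative data structure). Both programs drain Beers with
-- heapq.heappop, so the mutation of Beers is identical; the theorem is about the
-- return value.

-- ===== PORT A =====
-- transliteration of CPython's heapq primitives (heapq.heappop is used by BOTH
-- Pythons on Beers; heappush/heappop on ints only by A, for Jeon), generic in the
-- element order `lt` and a getD default `d`

def hget {α : Type} (d : α) (a : List α) (i : Nat) : α := a.getD i d

-- Python's list < list (lexicographic, as reached on lists of ints)
def pyLtL : List Int → List Int → Bool
  | _, [] => false
  | [], _ :: _ => true
  | x :: xs, y :: ys => if x = y then pyLtL xs ys else decide (x < y)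

def ltI : Int → Int → Bool := fun x y => decide (x < y)

-- heapq._siftdown(heap, startpos, pos) with newitem = heap[pos] passed explicitly
def sdLoop {α : Type} (lt : α → α → Bool) (d : α) (a : List α) (start pos : Nat) (x : α) : List α :=
  if h : start < pos then
    if lt x (hget d a ((pos - 1) / 2)) then
      sdLoop lt d (a.set pos (hget d a ((pos - 1) / 2))) start ((pos - 1) / 2) x
    else a.set pos x
  else a.set pos x
termination_by pos
decreasing_by omega

def siftdown {α : Type} (lt : α → α → Bool) (d : α) (a : List α) (start pos : Nat) : List α :=
  sdLoop lt d a start pos (hget d a pos)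

-- heapq.heappush
def heappush {α : Type} (lt : α → α → Bool) (d : α) (a : List α) (x : α) : List α :=
  siftdown lt d (a ++ [x]) 0 a.length

-- the while-loop of heapq._siftup (walks the hole down to a child-less position)
def suLoop {α : Type} (lt : α → α → Bool) (d : α) (a : List α) (pos : Nat) : List α × Nat :=
  if h : 2 * pos + 1 < a.length then
    if h2 : 2 * pos + 2 < a.length ∧ lt (hget d a (2 * pos + 1)) (hget d a (2 * pos + 2)) = false then
      suLoop lt d (a.set pos (hget d a (2 * pos + 2))) (2 * pos + 2)
    else
      suLoop lt d (a.set pos (hget d a (2 * pos + 1))) (2 * pos + 1)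
  else (a, pos)
termination_by a.length - pos
decreasing_by
  · simp only [List.length_set]; omega
  · simp only [List.length_set]; omega

-- heapq._siftup(heap, pos): walk the hole down, write newitem, then _siftdown back up
def siftup {α : Type} (lt : α → α → Bool) (d : α) (a : List α) (pos : Nat) : List α :=
  let x := hget d a pos
  let r := suLoop lt d a pos
  sdLoop lt d (r.1.set r.2 x) pos r.2 x

-- heapq.heappop; none = IndexError on an empty list
def heappop {α : Type} (lt : α → α → Bool) (d : α) (a : List α) : Option (α × List α) :=
  match a.getLast? with
  | none => none
  | some last =>
    let rest := a.dropLast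
    if rest.isEmpty then some (last, [])
    else some (hget d rest 0, siftup lt d (rest.set 0 last) 0)

-- the for-loop of A; out-of-Pre raises (empty pop / non-pair row) are mapped to -1
def solveLoopA (Bs : List (List Int)) (Jeon : List Int) (currM N M : Int) (k : Nat) : Int :=
  match k with
  | 0 => -1
  | Nat.succ k' =>
    match heappop pyLtL [] Bs with
    | none => -1
    | some (b, Bs') =>
      match b with
      | [c, m] =>
        let currM' := currM + m
        let Jeon' := heappush ltI 0 Jeon m
        if (Jeon'.length : Int) = N then
          if M ≤ currM' then c
          else
            match heappop ltI 0 Jeon' with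
            | none => -1
            | some (mn, Jeon'') => solveLoopA Bs' Jeon'' (currM' - mn) N M k'
        else solveLoopA Bs' Jeon' currM' N M k'
      | _ => -1

def solve (Beers : List (List Int)) (N : Int) (M : Int) (K : Int) : Int :=
  solveLoopA Beers [] 0 N M K.toNat

-- ===== PORT B =====
-- the scan `i = 0; while i < len(window) and window[i] <= m: i += 1` followed by
-- `window.insert(i, m)`: insert m before the first element greater than m
def insAsc : List Int → Int → List Int
  | [], m => [m]
  | x :: xs, m => if x ≤ m then x :: insAsc xs m else m :: x :: xs

-- the for-loop of B; out-of-Pre raises are mapped to -1 exactly as in port A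
-- (the [] arm for the full window is unreachable: insAsc never returns [])
def solveLoopB (Bs : List (List Int)) (win : List Int) (tot N M : Int) (k : Nat) : Int :=
  match k with
  | 0 => -1
  | Nat.succ k' =>
    match heappop pyLtL [] Bs with
    | none => -1
    | some (b, Bs') =>
      match b with
      | [c, m] =>
        let tot' := tot + m
        let win' := insAsc win m
        if (win'.length : Int) = N then
          if M ≤ tot' then c
          else
            match win' with
            | [] => -1
            | mn :: rest => solveLoopB Bs' rest (tot' - mn) N M k'
        else solveLoopB Bs' win' tot' N M k'
      | _ => -1

def solve_alt (Beers : List (List Int)) (N : Int) (M : Int) (K : Int) : Int :=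
  solveLoopB Beers [] 0 N M K.toNat

-- ===== PRECONDITION & SPEC =====
-- Pre_ excludes exactly the inputs on which the loop can hit an exception: a heappop
-- from an exhausted Beers (K > len(Beers)) or unpacking a row that is not a pair
-- (ValueError). Whether the raising step is actually reached depends on run-time
-- values, so this closed-form condition over-approximates: on the excluded inputs
-- where an early return fires first, A and B return the SAME value (B raises exactly
-- where A raises and returns A's value everywhere else — see the cited examples);
-- the exclusion only reflects that 'raises vs returns' has no closed form here.
def Pre_solve (Beers : List (List Int)) (N : Int) (M : Int) (K : Int) : Prop :=
  K ≤ 0 ∨ (K ≤ (Beers.length : Int) ∧ ∀ b ∈ Beers, b.length = 2)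
instance (Beers : List (List Int)) (N : Int) (M : Int) (K : Int) : Decidable (Pre_solve Beers N M K) := by
  unfold Pre_solve; infer_instance

def pvWitness_solve : List (List Int) × Int × Int × Int := ([[1, 5], [2, 7]], 2, 10, 2)

def Spec_solve (Beers : List (List Int)) (N : Int) (M : Int) (K : Int) (out : Int) : Prop := out = solve_alt Beers N M K
instance (Beers : List (List Int)) (N : Int) (M : Int) (K : Int) (out : Int) : Decidable (Spec_solve Beers N M K out) := by unfold Spec_solve; infer_instance

-- ===== CLAIM (what is proved, stated in full; the proofs are below) =====
def Claim_equal_solve : Prop := ∀ (Beers : List (List Int)) (N : Int) (M : Int) (K : Int), Dom_solve Beers N M K → Pre_solve Beers N M K → Spec_solve Beers N M K (solve Beers N M K)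

-- ===== LEMMAS AND PROOFS =====

theorem hget_set_self {α : Type} (d : α) (a : List α) (i : Nat) (v : α) (h : i < a.length) :
    hget d (a.set i v) i = v := by
  simp [hget, List.getD, h]

theorem hget_set_ne {α : Type} (d : α) (a : List α) (i j : Nat) (v : α) (hne : i ≠ j) :
    hget d (a.set i v) j = hget d a j := by
  simp [hget, List.getD, List.getElem?_set_ne, hne]

theorem mset_set {α : Type} (d : α) (a : List α) (i : Nat) (v : α) (h : i < a.length) :
    ((a.set i v : List α) : Multiset α) + {hget d a i} = (a : Multiset α) + {v} := by
  induction a generalizing i with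
  | nil => simp at h
  | cons hd tl ih =>
    cases i with
    | zero =>
      simp [hget, List.set, ← Multiset.cons_coe, ← Multiset.singleton_add]
      abel
    | succ i =>
      have h' : i < tl.length := by simpa using h
      have ih' := ih i h'
      show ((hd :: tl.set i v : List α) : Multiset α) + {hget d (hd :: tl) (i+1)} = _
      rw [← Multiset.cons_coe, ← Multiset.cons_coe (a := hd)]
      have hg : hget d (hd :: tl) (i+1) = hget d tl i := by simp [hget]
      rw [hg, Multiset.cons_add, Multiset.cons_add, ih']

theorem swap_mset {α : Type} (d : α) (a : List α) (i j : Nat) (v : α)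
    (hi : i < a.length) (hj : j < a.length) (hne : i ≠ j) :
    (((a.set i (hget d a j)).set j v : List α) : Multiset α) = ((a.set i v : List α) : Multiset α) := by
  have h1 := mset_set d (a.set i (hget d a j)) j v (by simpa using hj)
  rw [hget_set_ne d a i j _ hne] at h1
  have h2 := mset_set d a i (hget d a j) hi
  have h3 := mset_set d a i v hi
  have key : (((a.set i (hget d a j)).set j v : List α) : Multiset α) + {hget d a j} + {hget d a i}
      = ((a.set i v : List α) : Multiset α) + {hget d a j} + {hget d a i} := by
    calc (((a.set i (hget d a j)).set j v : List α) : Multiset α) + {hget d a j} + {hget d a i}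
        = ((a.set i (hget d a j) : List α) : Multiset α) + {v} + {hget d a i} := by rw [h1]
      _ = ((a.set i (hget d a j) : List α) : Multiset α) + {hget d a i} + {v} := by rw [add_right_comm]
      _ = ((a : List α) : Multiset α) + {hget d a j} + {v} := by rw [h2]
      _ = ((a : List α) : Multiset α) + {v} + {hget d a j} := by rw [add_right_comm]
      _ = ((a.set i v : List α) : Multiset α) + {hget d a i} + {hget d a j} := by rw [h3]
      _ = ((a.set i v : List α) : Multiset α) + {hget d a j} + {hget d a i} := by rw [add_right_comm]
  exact add_right_cancel (add_right_cancel key)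

-- length and multiset behaviour of sdLoop
theorem sd_basic {α : Type} (lt : α → α → Bool) (d : α) :
    ∀ (pos : Nat) (a : List α) (s : Nat) (x : α), pos < a.length →
      (sdLoop lt d a s pos x).length = a.length ∧
      ((sdLoop lt d a s pos x : List α) : Multiset α) + {hget d a pos} = (a : Multiset α) + {x} := by
  intro pos
  induction pos using Nat.strong_induction_on with
  | _ pos IH =>
    intro a s x h
    rw [sdLoop]
    split_ifs with h1 h2
    · have hpp : (pos - 1) / 2 < pos := by omega
      have hne : pos ≠ (pos - 1) / 2 := by omega
      obtain ⟨hl, hm⟩ := IH ((pos - 1) / 2) hpp (a.set pos (hget d a ((pos - 1) / 2))) s x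
        (by simpa using by omega)
      rw [hget_set_ne d a pos ((pos - 1) / 2) _ hne] at hm
      refine ⟨by simpa using hl, ?_⟩
      have key2 : ((sdLoop lt d (a.set pos (hget d a ((pos - 1) / 2))) s ((pos - 1) / 2) x : List α) : Multiset α)
          + {hget d a pos} + {hget d a ((pos - 1) / 2)}
          = (a : Multiset α) + {x} + {hget d a ((pos - 1) / 2)} := by
        rw [add_right_comm, hm, add_right_comm,
          mset_set d a pos (hget d a ((pos - 1) / 2)) h, add_right_comm]
      exact add_right_cancel key2
    · exact ⟨by simp, mset_set d a pos x h⟩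
    · exact ⟨by simp, mset_set d a pos x h⟩

-- length, final-position and multiset behaviour of suLoop
theorem su_basic {α : Type} (lt : α → α → Bool) (d : α) :
    ∀ (n : Nat) (a : List α) (pos : Nat), a.length - pos ≤ n → pos < a.length →
      (suLoop lt d a pos).1.length = a.length ∧
      (suLoop lt d a pos).2 < a.length ∧
      ∀ v, (((suLoop lt d a pos).1.set (suLoop lt d a pos).2 v : List α) : Multiset α)
            = ((a.set pos v : List α) : Multiset α) := by
  intro n
  induction n with
  | zero => intro a pos hn h; omega
  | succ n IH =>
    intro a pos hn h
    rw [suLoop]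
    split_ifs with h1 h2
    · obtain ⟨l, p2, mv⟩ := IH (a.set pos (hget d a (2 * pos + 2))) (2 * pos + 2)
        (by simp only [List.length_set]; omega) (by simp only [List.length_set]; omega)
      simp only [List.length_set] at l p2
      exact ⟨l, p2, fun v => by
        rw [mv v, swap_mset d a pos (2 * pos + 2) v h h2.1 (by omega)]⟩
    · obtain ⟨l, p2, mv⟩ := IH (a.set pos (hget d a (2 * pos + 1))) (2 * pos + 1)
        (by simp only [List.length_set]; omega) (by simp only [List.length_set]; omega)
      simp only [List.length_set] at l p2
      exact ⟨l, p2, fun v => by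
        rw [mv v, swap_mset d a pos (2 * pos + 1) v h h1 (by omega)]⟩
    · exact ⟨rfl, h, fun v => rfl⟩

theorem push_perm {α : Type} (lt : α → α → Bool) (d : α) (a : List α) (x : α) :
    ((heappush lt d a x : List α) : Multiset α) = (a : Multiset α) + {x} := by
  unfold heappush siftdown
  have hx : hget d (a ++ [x]) a.length = x := by simp [hget, List.getD]
  rw [hx]
  have h := (sd_basic lt d a.length (a ++ [x]) 0 x (by simp)).2
  rw [hx] at h
  rw [add_right_cancel h]
  rfl

theorem length_push {α : Type} (lt : α → α → Bool) (d : α) (a : List α) (x : α) :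
    (heappush lt d a x).length = a.length + 1 := by
  have := congrArg Multiset.card (push_perm lt d a x)
  simpa using this

theorem pop_basic {α : Type} (lt : α → α → Bool) (d : α) (a : List α) (hne : a ≠ []) :
    ∃ a', heappop lt d a = some (hget d a 0, a') ∧
      ((a' : List α) : Multiset α) + {hget d a 0} = (a : Multiset α) := by
  cases ha : a.getLast? with
  | none => rw [List.getLast?_eq_none_iff] at ha; exact absurd ha hne
  | some last =>
    have hlast : last = a.getLast hne := by
      rw [List.getLast?_eq_some_getLast hne] at ha; exact (Option.some_inj.mp ha).symm
    have hsplit : a.dropLast ++ [last] = a := by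
      rw [hlast]; exact List.dropLast_append_getLast hne
    by_cases hres : a.dropLast.isEmpty
    · rw [List.isEmpty_iff] at hres
      have ha1 : a = [last] := by rw [← hsplit, hres]; rfl
      refine ⟨[], ?_, ?_⟩
      · simp [heappop, ha1, hget]
      · rw [ha1]; simp [hget]
    · rw [List.isEmpty_iff] at hres
      have hrl : 0 < a.dropLast.length := List.length_pos_of_ne_nil hres
      have hget0 : hget d a 0 = hget d a.dropLast 0 := by
        conv_lhs => rw [← hsplit]
        have h0 : (a.dropLast ++ [last])[0]? = a.dropLast[0]? := List.getElem?_append_left hrl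
        simp only [hget, List.getD]
        rw [h0]
      have ha0len : 0 < (a.dropLast.set 0 last).length := by simpa using hrl
      have hx' : hget d (a.dropLast.set 0 last) 0 = last := hget_set_self d a.dropLast 0 last hrl
      obtain ⟨l, p2, mv⟩ := su_basic lt d (a.dropLast.set 0 last).length (a.dropLast.set 0 last) 0
        (by omega) ha0len
      have hp2' : (suLoop lt d (a.dropLast.set 0 last) 0).2
          < (suLoop lt d (a.dropLast.set 0 last) 0).1.length := by omega
      obtain ⟨_, hm⟩ := sd_basic lt d (suLoop lt d (a.dropLast.set 0 last) 0).2
        ((suLoop lt d (a.dropLast.set 0 last) 0).1.set (suLoop lt d (a.dropLast.set 0 last) 0).2 last)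
        0 last (by simpa using hp2')
      rw [hget_set_self _ _ _ _ hp2'] at hm
      have hres1 := add_right_cancel hm
      rw [mv last] at hres1
      refine ⟨siftup lt d (a.dropLast.set 0 last) 0, ?_, ?_⟩
      · simp only [heappop, ha]
        rw [if_neg (by simpa [List.isEmpty_iff] using hres), hget0]
      · have hsift : ((siftup lt d (a.dropLast.set 0 last) 0 : List α) : Multiset α)
            = (((a.dropLast.set 0 last).set 0 last : List α) : Multiset α) := by
          unfold siftup
          rw [hx']
          exact hres1
        rw [hsift, List.set_set, hget0]
        calc ((a.dropLast.set 0 last : List α) : Multiset α) + {hget d a.dropLast 0}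
            = (a.dropLast : Multiset α) + {last} := mset_set d a.dropLast 0 last hrl
          _ = ((a.dropLast ++ [last] : List α) : Multiset α) := rfl
          _ = (a : Multiset α) := by rw [hsplit]

-- heap order: the binary-heap child relation and the heap property (for the Int heap Jeon)
def chld (i j : Nat) : Prop := j = 2 * i + 1 ∨ j = 2 * i + 2

def IsHeap (a : List Int) : Prop :=
  ∀ i j, chld i j → j < a.length → hget 0 a i ≤ hget 0 a j

theorem hget_append_left {α : Type} (d : α) (a : List α) (x : α) (t : Nat) (ht : t < a.length) :
    hget d (a ++ [x]) t = hget d a t := by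
  simp only [hget, List.getD]
  rw [List.getElem?_append_left ht]

theorem hget_concat {α : Type} (d : α) (a : List α) (x : α) :
    hget d (a ++ [x]) a.length = x := by
  simp [hget, List.getD]

theorem hget_eq_getElem {α : Type} (d : α) (a : List α) (i : Nat) (h : i < a.length) :
    hget d a i = a[i] := List.getD_eq_getElem a d h

theorem hget_dropLast {α : Type} (d : α) (a : List α) (t : Nat) (ht : t < a.dropLast.length) :
    hget d a.dropLast t = hget d a t := by
  have ht' : t < a.length := by
    have h2 := ht
    rw [List.length_dropLast] at h2
    omega
  rw [hget_eq_getElem d a.dropLast t ht, hget_eq_getElem d a t ht', List.getElem_dropLast]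

theorem root_min (a : List Int) (h : IsHeap a) : ∀ i, i < a.length → hget 0 a 0 ≤ hget 0 a i := by
  intro i
  induction i using Nat.strong_induction_on with
  | _ i IH =>
    intro hi
    rcases Nat.eq_zero_or_pos i with h0 | h0
    · subst h0; exact le_refl _
    · have hp : chld ((i - 1) / 2) i := by unfold chld; omega
      exact le_trans (IH ((i - 1) / 2) (by omega) (by omega)) (h _ i hp hi)

theorem root_min_mem (a : List Int) (h : IsHeap a) (y : Int) (hy : y ∈ a) : hget 0 a 0 ≤ y := by
  obtain ⟨i, hi, rfl⟩ := List.getElem_of_mem hy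
  rw [← hget_eq_getElem 0 a i hi]
  exact root_min a h i hi

theorem sd_correct :
    ∀ (pos : Nat) (a : List Int) (x : Int), pos < a.length →
      (∀ i j, chld i j → j < a.length → j ≠ pos →
          hget 0 (a.set pos x) i ≤ hget 0 (a.set pos x) j) →
      (∀ j, chld pos j → j < a.length → 0 < pos →
          hget 0 a ((pos - 1) / 2) ≤ hget 0 a j) →
      IsHeap (sdLoop ltI 0 a 0 pos x) := by
  intro pos
  induction pos using Nat.strong_induction_on with
  | _ pos IH =>
    intro a x hlen H1 H2
    rw [sdLoop]
    split_ifs with h1 h2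
    · -- 0 < pos and x < parent: move the parent down, recurse at the parent position
      have hpp : (pos - 1) / 2 < pos := by omega
      have hplen : (pos - 1) / 2 < a.length := by omega
      have hnep : pos ≠ (pos - 1) / 2 := by omega
      have hlt : x < hget 0 a ((pos - 1) / 2) := by simpa [ltI] using h2
      have Hval : ∀ i j, chld i j → j < a.length → j ≠ pos → i ≠ pos →
          hget 0 a i ≤ hget 0 a j := by
        intro i j hc hj hjne hine
        have := H1 i j hc hj hjne
        rwa [hget_set_ne 0 a pos i x (fun hh => hine hh.symm),
          hget_set_ne 0 a pos j x (fun hh => hjne hh.symm)] at this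
      apply IH ((pos - 1) / 2) hpp (a.set pos (hget 0 a ((pos - 1) / 2))) x
        (by simpa using hplen)
      · intro i j hc hj hjne
        simp only [List.length_set] at hj
        by_cases hjpos : j = pos
        · have hip : i = (pos - 1) / 2 := by unfold chld at hc; omega
          rw [hip, hjpos,
            hget_set_self 0 (a.set pos (hget 0 a ((pos - 1) / 2))) ((pos - 1) / 2) x
              (by simpa using hplen),
            hget_set_ne 0 (a.set pos (hget 0 a ((pos - 1) / 2))) ((pos - 1) / 2) pos x hnep.symm,
            hget_set_self 0 a pos _ hlen]
          exact le_of_lt hlt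
        · by_cases hipos : i = pos
          · rw [hipos,
              hget_set_ne 0 (a.set pos (hget 0 a ((pos - 1) / 2))) ((pos - 1) / 2) pos x hnep.symm,
              hget_set_self 0 a pos _ hlen,
              hget_set_ne 0 (a.set pos (hget 0 a ((pos - 1) / 2))) ((pos - 1) / 2) j x hjne.symm,
              hget_set_ne 0 a pos j (hget 0 a ((pos - 1) / 2)) (fun hh => hjpos hh.symm)]
            exact H2 j (by rw [← hipos]; exact hc) hj h1
          · by_cases hipp : i = (pos - 1) / 2
            · rw [hipp,
                hget_set_self 0 (a.set pos (hget 0 a ((pos - 1) / 2))) ((pos - 1) / 2) x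
                  (by simpa using hplen),
                hget_set_ne 0 (a.set pos (hget 0 a ((pos - 1) / 2))) ((pos - 1) / 2) j x hjne.symm,
                hget_set_ne 0 a pos j (hget 0 a ((pos - 1) / 2)) (fun hh => hjpos hh.symm)]
              have := Hval ((pos - 1) / 2) j (by rw [← hipp]; exact hc) hj hjpos hnep.symm
              exact le_trans (le_of_lt hlt) this
            · rw [hget_set_ne 0 (a.set pos (hget 0 a ((pos - 1) / 2))) ((pos - 1) / 2) i x
                  (fun hh => hipp hh.symm),
                hget_set_ne 0 a pos i (hget 0 a ((pos - 1) / 2)) (fun hh => hipos hh.symm),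
                hget_set_ne 0 (a.set pos (hget 0 a ((pos - 1) / 2))) ((pos - 1) / 2) j x hjne.symm,
                hget_set_ne 0 a pos j (hget 0 a ((pos - 1) / 2)) (fun hh => hjpos hh.symm)]
              exact Hval i j hc hj hjpos hipos
      · intro j hc hj h0
        simp only [List.length_set] at hj
        have hjq : j ≠ ((pos - 1) / 2 - 1) / 2 := by unfold chld at hc; omega
        have hqp : ((pos - 1) / 2 - 1) / 2 ≠ pos := by omega
        have hqpp : ((pos - 1) / 2 - 1) / 2 ≠ (pos - 1) / 2 := by omega
        rw [hget_set_ne 0 a pos (((pos - 1) / 2 - 1) / 2) _ hqp.symm]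
        by_cases hjpos : j = pos
        · rw [hjpos, hget_set_self 0 a pos _ hlen]
          exact Hval (((pos - 1) / 2 - 1) / 2) ((pos - 1) / 2)
            (by unfold chld; omega) hplen hnep.symm hqp
        · rw [hget_set_ne 0 a pos j _ (fun hh => hjpos hh.symm)]
          have step1 : hget 0 a (((pos - 1) / 2 - 1) / 2) ≤ hget 0 a ((pos - 1) / 2) :=
            Hval _ _ (by unfold chld; omega) hplen hnep.symm hqp
          have step2 : hget 0 a ((pos - 1) / 2) ≤ hget 0 a j :=
            Hval _ _ hc hj hjpos hnep.symm
          exact le_trans step1 step2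
    · intro i j hc hj
      simp only [List.length_set] at hj
      have hge : hget 0 a ((pos - 1) / 2) ≤ x := by simpa [ltI, not_lt] using h2
      by_cases hjpos : j = pos
      · have hip : i = (pos - 1) / 2 := by unfold chld at hc; omega
        rw [hip, hjpos, hget_set_self 0 a pos x hlen,
          hget_set_ne 0 a pos ((pos - 1) / 2) x (by omega)]
        exact hge
      · exact H1 i j hc hj hjpos
    · intro i j hc hj
      simp only [List.length_set] at hj
      have hpos0 : pos = 0 := by omega
      have hjne : j ≠ pos := by unfold chld at hc; omega
      exact H1 i j hc hj hjne

theorem su_correct :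
    ∀ (n : Nat) (a : List Int) (pos : Nat), a.length - pos ≤ n → pos < a.length →
      (∀ i j, chld i j → j < a.length → j ≠ pos → i ≠ pos → hget 0 a i ≤ hget 0 a j) →
      (∀ j, chld pos j → j < a.length → 0 < pos → hget 0 a ((pos - 1) / 2) ≤ hget 0 a j) →
      (∀ i j, chld i j → j < (suLoop ltI 0 a pos).1.length → j ≠ (suLoop ltI 0 a pos).2 →
          i ≠ (suLoop ltI 0 a pos).2 →
          hget 0 (suLoop ltI 0 a pos).1 i ≤ hget 0 (suLoop ltI 0 a pos).1 j) ∧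
      (suLoop ltI 0 a pos).1.length ≤ 2 * (suLoop ltI 0 a pos).2 + 1 := by
  intro n
  induction n with
  | zero => intro a pos hn h; omega
  | succ n IH =>
    intro a pos hn hlen W V
    rw [suLoop]
    split_ifs with h1 h2
    · have hc2 : 2 * pos + 2 < a.length := h2.1
      have hmin : hget 0 a (2 * pos + 2) ≤ hget 0 a (2 * pos + 1) := by
        have := h2.2
        simpa [ltI, not_lt] using this
      apply IH (a.set pos (hget 0 a (2 * pos + 2))) (2 * pos + 2)
        (by simp only [List.length_set]; omega) (by simp only [List.length_set]; omega)
      · intro i j hc hj hjne hine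
        simp only [List.length_set] at hj
        by_cases hipos : i = pos
        · have hj1 : j = 2 * pos + 1 := by unfold chld at hc; rw [hipos] at hc; omega
          rw [hipos, hj1, hget_set_self 0 a pos _ hlen,
            hget_set_ne 0 a pos (2 * pos + 1) _ (by omega)]
          exact hmin
        · by_cases hjpos : j = pos
          · have hip : i = (pos - 1) / 2 := by unfold chld at hc; omega
            have h0 : 0 < pos := by
              rcases Nat.eq_zero_or_pos pos with hp0 | hp0
              · exfalso; unfold chld at hc; omega
              · exact hp0
            rw [hjpos, hget_set_self 0 a pos _ hlen,
              hget_set_ne 0 a pos i _ (fun hh => hipos hh.symm), hip]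
            exact V (2 * pos + 2) (by unfold chld; omega) hc2 h0
          · rw [hget_set_ne 0 a pos i _ (fun hh => hipos hh.symm),
              hget_set_ne 0 a pos j _ (fun hh => hjpos hh.symm)]
            exact W i j hc hj hjpos hipos
      · intro j hc hj h0
        simp only [List.length_set] at hj
        have hpc : (2 * pos + 2 - 1) / 2 = pos := by omega
        rw [hpc, hget_set_self 0 a pos _ hlen,
          hget_set_ne 0 a pos j _ (by unfold chld at hc; omega)]
        exact W (2 * pos + 2) j hc hj (by unfold chld at hc; omega) (by omega)
    · have hmin : 2 * pos + 2 < a.length → hget 0 a (2 * pos + 1) ≤ hget 0 a (2 * pos + 2) := by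
        intro hr
        rcases Bool.eq_false_or_eq_true (ltI (hget 0 a (2 * pos + 1)) (hget 0 a (2 * pos + 2))) with hb | hb
        · exact le_of_lt (by simpa [ltI] using hb)
        · exact absurd ⟨hr, hb⟩ h2
      apply IH (a.set pos (hget 0 a (2 * pos + 1))) (2 * pos + 1)
        (by simp only [List.length_set]; omega) (by simp only [List.length_set]; omega)
      · intro i j hc hj hjne hine
        simp only [List.length_set] at hj
        by_cases hipos : i = pos
        · have hj1 : j = 2 * pos + 2 := by unfold chld at hc; rw [hipos] at hc; omega
          rw [hipos, hj1, hget_set_self 0 a pos _ hlen,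
            hget_set_ne 0 a pos (2 * pos + 2) _ (by omega)]
          exact hmin (hj1 ▸ hj)
        · by_cases hjpos : j = pos
          · have hip : i = (pos - 1) / 2 := by unfold chld at hc; omega
            have h0 : 0 < pos := by
              rcases Nat.eq_zero_or_pos pos with hp0 | hp0
              · exfalso; unfold chld at hc; omega
              · exact hp0
            rw [hjpos, hget_set_self 0 a pos _ hlen,
              hget_set_ne 0 a pos i _ (fun hh => hipos hh.symm), hip]
            exact V (2 * pos + 1) (by unfold chld; omega) h1 h0
          · rw [hget_set_ne 0 a pos i _ (fun hh => hipos hh.symm),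
              hget_set_ne 0 a pos j _ (fun hh => hjpos hh.symm)]
            exact W i j hc hj hjpos hipos
      · intro j hc hj h0
        simp only [List.length_set] at hj
        have hpc : (2 * pos + 1 - 1) / 2 = pos := by omega
        rw [hpc, hget_set_self 0 a pos _ hlen,
          hget_set_ne 0 a pos j _ (by unfold chld at hc; omega)]
        exact W (2 * pos + 1) j hc hj (by unfold chld at hc; omega) (by omega)
    · exact ⟨W, by show a.length ≤ 2 * pos + 1; omega⟩

theorem push_isHeap (a : List Int) (x : Int) (h : IsHeap a) : IsHeap (heappush ltI 0 a x) := by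
  unfold heappush siftdown
  rw [hget_concat 0 a x]
  apply sd_correct a.length (a ++ [x]) x (by simp)
  · intro i j hc hj hjne
    simp only [List.length_append, List.length_singleton] at hj
    have hjlen : j < a.length := by omega
    have hilen : i < a.length := by unfold chld at hc; omega
    have hine : a.length ≠ i := by omega
    have hjne' : a.length ≠ j := by omega
    rw [hget_set_ne 0 (a ++ [x]) a.length i x hine,
      hget_set_ne 0 (a ++ [x]) a.length j x hjne',
      hget_append_left 0 a x i hilen, hget_append_left 0 a x j hjlen]
    exact h i j hc hjlen
  · intro j hc hj h0
    exfalso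
    simp only [List.length_append, List.length_singleton] at hj
    unfold chld at hc
    omega

theorem pop_isHeap (a : List Int) (h : IsHeap a) (hne : a ≠ []) (r : Int) (a' : List Int)
    (he : heappop ltI 0 a = some (r, a')) : IsHeap a' := by
  cases ha : a.getLast? with
  | none => rw [List.getLast?_eq_none_iff] at ha; exact absurd ha hne
  | some last =>
    by_cases hres : a.dropLast.isEmpty
    · have : heappop ltI 0 a = some (last, []) := by
        simp [heappop, ha, hres]
      rw [this] at he
      obtain ⟨_, rfl⟩ : last = r ∧ [] = a' := by
        constructor <;> [exact (Prod.mk.injEq _ _ _ _ ▸ Option.some_inj.mp he).1;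
          exact (Prod.mk.injEq _ _ _ _ ▸ Option.some_inj.mp he).2]
      intro i j hc hj
      simp at hj
    · rw [List.isEmpty_iff] at hres
      have hrl : 0 < a.dropLast.length := List.length_pos_of_ne_nil hres
      have hpop : heappop ltI 0 a
          = some (hget 0 a.dropLast 0, siftup ltI 0 (a.dropLast.set 0 last) 0) := by
        simp only [heappop, ha]
        rw [if_neg (by simpa [List.isEmpty_iff] using hres)]
      rw [hpop] at he
      have ha' : a' = siftup ltI 0 (a.dropLast.set 0 last) 0 :=
        ((Prod.mk.injEq _ _ _ _ ▸ Option.some_inj.mp he).2).symm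
      subst ha'
      have ha0len : 0 < (a.dropLast.set 0 last).length := by simpa using hrl
      have hx' : hget 0 (a.dropLast.set 0 last) 0 = last := hget_set_self 0 a.dropLast 0 last hrl
      have W0 : ∀ i j, chld i j → j < (a.dropLast.set 0 last).length → j ≠ 0 → i ≠ 0 →
          hget 0 (a.dropLast.set 0 last) i ≤ hget 0 (a.dropLast.set 0 last) j := by
        intro i j hc hj hjne hine
        simp only [List.length_set] at hj
        rw [hget_set_ne 0 a.dropLast 0 i last (fun hh => hine hh.symm),
          hget_set_ne 0 a.dropLast 0 j last (fun hh => hjne hh.symm),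
          hget_dropLast 0 a i (by unfold chld at hc; omega), hget_dropLast 0 a j hj]
        have hj2 : j < a.length := by
          have := hj; rw [List.length_dropLast] at this; omega
        exact h i j hc hj2
      have V0 : ∀ j, chld 0 j → j < (a.dropLast.set 0 last).length → (0 : Nat) < 0 →
          hget 0 (a.dropLast.set 0 last) ((0 - 1) / 2) ≤ hget 0 (a.dropLast.set 0 last) j := by
        intro j _ _ h0; omega
      obtain ⟨Wr, hnoch⟩ := su_correct (a.dropLast.set 0 last).length (a.dropLast.set 0 last) 0
        (by omega) ha0len W0 V0
      obtain ⟨l, p2, _⟩ := su_basic ltI 0 (a.dropLast.set 0 last).length (a.dropLast.set 0 last) 0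
        (by omega) ha0len
      have hp2' : (suLoop ltI 0 (a.dropLast.set 0 last) 0).2
          < (suLoop ltI 0 (a.dropLast.set 0 last) 0).1.length := by omega
      unfold siftup
      rw [hx']
      apply sd_correct (suLoop ltI 0 (a.dropLast.set 0 last) 0).2
        ((suLoop ltI 0 (a.dropLast.set 0 last) 0).1.set
          (suLoop ltI 0 (a.dropLast.set 0 last) 0).2 last) last (by simpa using hp2')
      · intro i j hc hj hjne
        rw [List.set_set] at *
        simp only [List.length_set] at hj
        have hine : i ≠ (suLoop ltI 0 (a.dropLast.set 0 last) 0).2 := by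
          intro hh
          unfold chld at hc
          omega
        rw [hget_set_ne 0 (suLoop ltI 0 (a.dropLast.set 0 last) 0).1 _ i last
            (fun hh => hine hh.symm),
          hget_set_ne 0 (suLoop ltI 0 (a.dropLast.set 0 last) 0).1 _ j last
            (fun hh => hjne hh.symm)]
        exact Wr i j hc (by omega) hjne hine
      · intro j hc hj h0
        exfalso
        simp only [List.length_set] at hj
        unfold chld at hc
        omega

-- B-side facts: insAsc adds one element and preserves ascending order
theorem insAsc_mset (w : List Int) (m : Int) :
    ((insAsc w m : List Int) : Multiset Int) = (w : Multiset Int) + {m} := by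
  induction w with
  | nil => rfl
  | cons x xs ih =>
    by_cases hx : x ≤ m
    · show ((if x ≤ m then x :: insAsc xs m else m :: x :: xs : List Int) : Multiset Int) = _
      rw [if_pos hx, ← Multiset.cons_coe, ih, ← Multiset.cons_coe, Multiset.cons_add]
    · show ((if x ≤ m then x :: insAsc xs m else m :: x :: xs : List Int) : Multiset Int) = _
      rw [if_neg hx, ← Multiset.cons_coe, ← Multiset.cons_coe]
      rw [add_comm, Multiset.singleton_add]

theorem insAsc_length (w : List Int) (m : Int) : (insAsc w m).length = w.length + 1 := by
  have := congrArg Multiset.card (insAsc_mset w m)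
  simpa using this

theorem insAsc_sorted (w : List Int) (m : Int) (hs : w.Pairwise (· ≤ ·)) :
    (insAsc w m).Pairwise (· ≤ ·) := by
  induction w with
  | nil => simp [insAsc]
  | cons x xs ih =>
    rw [List.pairwise_cons] at hs
    show ((if x ≤ m then x :: insAsc xs m else m :: x :: xs : List Int)).Pairwise (· ≤ ·)
    by_cases hx : x ≤ m
    · rw [if_pos hx, List.pairwise_cons]
      refine ⟨?_, ih hs.2⟩
      intro y hy
      have : y ∈ ((insAsc xs m : List Int) : Multiset Int) := hy
      rw [insAsc_mset] at this
      rcases Multiset.mem_add.mp this with hmem | hmem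
      · exact hs.1 y hmem
      · rw [Multiset.mem_singleton.mp hmem]; exact hx
    · rw [if_neg hx, List.pairwise_cons]
      rw [not_le] at hx
      refine ⟨?_, List.pairwise_cons.mpr hs⟩
      intro y hy
      rcases List.mem_cons.mp hy with rfl | hmem
      · exact le_of_lt hx
      · exact le_trans (le_of_lt hx) (hs.1 y hmem)

theorem sorted_head_min (mn : Int) (rest : List Int) (hs : (mn :: rest).Pairwise (· ≤ ·)) :
    ∀ y ∈ mn :: rest, mn ≤ y := by
  intro y hy
  rcases List.mem_cons.mp hy with rfl | hmem
  · exact le_refl y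
  · exact (List.pairwise_cons.mp hs).1 y hmem

-- the loop invariant: same popped Beers, A's Jeon a heap and B's window an ascending
-- list holding the same multiset of values ⇒ same result
theorem loop_eq :
    ∀ (k : Nat) (Bs : List (List Int)) (JA W : List Int) (cm N M : Int),
      k ≤ Bs.length → (∀ b ∈ Bs, b.length = 2) →
      ((JA : List Int) : Multiset Int) = (W : Multiset Int) → IsHeap JA →
      W.Pairwise (· ≤ ·) →
      solveLoopA Bs JA cm N M k = solveLoopB Bs W cm N M k := by
  intro k
  induction k with
  | zero => intro Bs JA W cm N M _ _ _ _ _; rfl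
  | succ k IH =>
    intro Bs JA W cm N M hk hmem hJ hH hS
    have hBs : Bs ≠ [] := by
      intro hh; subst hh; simp at hk
    obtain ⟨Bs', hpop, hmB⟩ := pop_basic pyLtL [] Bs hBs
    have hBs'len : Bs'.length + 1 = Bs.length := by
      have := congrArg Multiset.card hmB
      simpa using this
    have hb_mem : hget [] Bs 0 ∈ Bs := by
      rw [hget_eq_getElem [] Bs 0 (by omega)]
      exact List.getElem_mem _
    have hmem' : ∀ x ∈ Bs', x ∈ Bs := by
      intro x hx
      have hx2 : x ∈ (Bs' : Multiset (List Int)) + {hget [] Bs 0} :=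
        Multiset.mem_add.mpr (Or.inl hx)
      rw [hmB] at hx2
      exact hx2
    have hb2 : (hget [] Bs 0).length = 2 := hmem _ hb_mem
    obtain ⟨c, m, hcm⟩ : ∃ c m, hget [] Bs 0 = [c, m] := by
      cases hl : hget [] Bs 0 with
      | nil => rw [hl] at hb2; simp at hb2
      | cons c tl =>
        cases tl with
        | nil => rw [hl] at hb2; simp at hb2
        | cons m tl2 =>
          cases tl2 with
          | nil => exact ⟨c, m, rfl⟩
          | cons d tl3 => rw [hl] at hb2; simp at hb2
    rw [hcm] at hpop
    have hJlen : JA.length = W.length := by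
      have := congrArg Multiset.card hJ
      simpa using this
    have hlen_eq : ((heappush ltI 0 JA m).length : Int) = ((insAsc W m).length : Int) := by
      rw [length_push ltI 0 JA m, insAsc_length]
      simp [hJlen]
    have hJ' : ((heappush ltI 0 JA m : List Int) : Multiset Int)
        = ((insAsc W m : List Int) : Multiset Int) := by
      rw [push_perm, insAsc_mset, hJ]
    have hH' : IsHeap (heappush ltI 0 JA m) := push_isHeap JA m hH
    have hS' : (insAsc W m).Pairwise (· ≤ ·) := insAsc_sorted W m hS
    simp only [solveLoopA, solveLoopB, hpop]
    rw [hlen_eq]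
    by_cases hN : ((insAsc W m).length : Int) = N
    · rw [if_pos hN, if_pos hN]
      by_cases hM : M ≤ cm + m
      · rw [if_pos hM, if_pos hM]
      · rw [if_neg hM, if_neg hM]
        have hne' : heappush ltI 0 JA m ≠ [] := by
          have := length_push ltI 0 JA m
          intro hh; rw [hh] at this; simp at this
        obtain ⟨JA'', hpop2, hm2⟩ := pop_basic ltI 0 (heappush ltI 0 JA m) hne'
        rw [hJ'] at hm2
        cases hW : insAsc W m with
        | nil =>
          exfalso
          have := insAsc_length W m
          rw [hW] at this
          simp at this
        | cons mn rest =>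
          rw [hW] at hm2 hS'
          have hroot_memA : hget 0 (heappush ltI 0 JA m) 0 ∈ heappush ltI 0 JA m := by
            rw [hget_eq_getElem 0 _ 0 (by rw [length_push]; omega)]
            exact List.getElem_mem _
          have hroot_memW : hget 0 (heappush ltI 0 JA m) 0 ∈ mn :: rest := by
            have h1 : hget 0 (heappush ltI 0 JA m) 0
                ∈ ((heappush ltI 0 JA m : List Int) : Multiset Int) := hroot_memA
            rw [hJ', hW] at h1
            exact h1
          have hmn_memA : mn ∈ heappush ltI 0 JA m := by
            have h1 : mn ∈ ((mn :: rest : List Int) : Multiset Int) := List.mem_cons_self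
            rw [← hW, ← hJ'] at h1
            exact h1
          have heq : hget 0 (heappush ltI 0 JA m) 0 = mn :=
            le_antisymm (root_min_mem _ hH' mn hmn_memA)
              (sorted_head_min mn rest hS' _ hroot_memW)
          rw [hpop2]
          show solveLoopA Bs' JA'' (cm + m - hget 0 (heappush ltI 0 JA m) 0) N M k
              = solveLoopB Bs' rest (cm + m - mn) N M k
          rw [heq]
          apply IH Bs' JA'' rest (cm + m - mn) N M (by omega)
            (fun b hb => hmem b (hmem' b hb)) ?_ (pop_isHeap _ hH' hne' _ _ hpop2)
            (List.Pairwise.of_cons hS')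
          rw [heq] at hm2
          have : ((JA'' : List Int) : Multiset Int) + {mn}
              = ((rest : List Int) : Multiset Int) + {mn} := by
            rw [hm2, ← Multiset.cons_coe, add_comm, Multiset.singleton_add]
          exact add_right_cancel this
    · rw [if_neg hN, if_neg hN]
      exact IH Bs' (heappush ltI 0 JA m) (insAsc W m) (cm + m) N M (by omega)
        (fun b hb => hmem b (hmem' b hb)) hJ' hH' hS'

-- ===== VERDICT (by name: the statement is the Claim_ definition above) =====
theorem solve_spec : Claim_equal_solve := by
  intro Beers N M K _ hpre
  unfold Spec_solve solve solve_alt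
  rcases hpre with hk | ⟨hk, hlen⟩
  · have : K.toNat = 0 := Int.toNat_of_nonpos hk
    rw [this]; rfl
  · exact loop_eq K.toNat Beers [] [] 0 N M (by omega) hlen rfl
      (by intro i j _ hj; simp at hj) (by simp)
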